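-- pv_equiv track=rewrite | github.com/justcho5/ADA | project/cluster_scripts/filter_incentivized.py | filter_func
-- ===== SOURCE A (Python) =====
-- def filter_func(bigrams):
--     """
--     Given a list of bigrams from a review's text, returns true if the review is
--     incentivized by using a lookup list
--     :param bigrams: Bigrams from the review's text, lemmatized for better matching
--     :return: True if the review is incentivized, False otherwise
--     """
--     # Tuples are saved as lists in Spark dataframes, convert them back to tuples
--     # and use set for faster searching
--     bg = set([tuple(b) for b in bigrams])
--
--     # Look for specific bigrams in the list
--     return (('complimentary', 'copy') in bg) or \
--            (('discount', 'exchange') in bg) or \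
--            (('exchange', 'product') in bg) or \
--            (('exchange', 'review') in bg) or \
--            (('exchange', 'unbiased') in bg) or \
--            (('exchange', 'free') in bg) or \
--            (('exchange', 'honest') in bg) or \
--            (('exchange', 'true') in bg) or \
--            (('exchange', 'truth') in bg) or \
--            (('fair', 'review') in bg) or \
--            (('free', 'discount') in bg) or \
--            (('free', 'exchange') in bg) or \
--            (('free', 'sample') in bg) or \
--            (('free', 'unbiased') in bg) or \
--            (('honest', 'feedback') in bg) or \
--            (('honest', 'unbiased') in bg) or \
--            (('opinion', 'state') in bg) or \
--            (('opinion', 'own') in bg) or \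
--            (('provide', 'exchange') in bg) or \
--            (('provide', 'sample') in bg) or \
--            (('provided', 'sample') in bg) or \
--            (('provided', 'exchange') in bg) or \
--            (('receive', 'free') in bg) or \
--            (('receive', 'free') in bg) or \
--            (('received', 'free') in bg) or \
--            (('received', 'sample') in bg) or \
--            (('return', 'unbiased') in bg) or \
--            (('review', 'sample') in bg) or \
--            (('sample', 'product') in bg) or \
--            (('sample', 'unbiased') in bg) or \
--            (('sample', 'free') in bg) or \
--            (('send', 'sample') in bg) or \
--            (('unbiased', 'review') in bg) or \
--            (('unbiased', 'opinion') in bg) or \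
--            (('unbiased', 'view') in bg)
-- ===== SOURCE B (Python) =====
-- TARGETS = frozenset([
--     ('complimentary', 'copy'), ('discount', 'exchange'), ('exchange', 'product'),
--     ('exchange', 'review'), ('exchange', 'unbiased'), ('exchange', 'free'),
--     ('exchange', 'honest'), ('exchange', 'true'), ('exchange', 'truth'),
--     ('fair', 'review'), ('free', 'discount'), ('free', 'exchange'),
--     ('free', 'sample'), ('free', 'unbiased'), ('honest', 'feedback'),
--     ('honest', 'unbiased'), ('opinion', 'state'), ('opinion', 'own'),
--     ('provide', 'exchange'), ('provide', 'sample'), ('provided', 'sample'),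
--     ('provided', 'exchange'), ('receive', 'free'), ('received', 'free'),
--     ('received', 'sample'), ('return', 'unbiased'), ('review', 'sample'),
--     ('sample', 'product'), ('sample', 'unbiased'), ('sample', 'free'),
--     ('send', 'sample'), ('unbiased', 'review'), ('unbiased', 'opinion'),
--     ('unbiased', 'view'),
-- ])
--
-- def filter_func(bigrams):
--     return any(tuple(b) in TARGETS for b in bigrams)
-- ===== Notes on version B (the rewrite author's own statement) =====
-- stated objective: idiomatic
-- what changed: B keeps the 34 target bigrams in one module-level frozenset and makes a single any() pass over the input testing each bigram against the table, instead of A building a set of all input bigrams and enumerating 34 separate 'in' disjunctions.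
import Mathlib
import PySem

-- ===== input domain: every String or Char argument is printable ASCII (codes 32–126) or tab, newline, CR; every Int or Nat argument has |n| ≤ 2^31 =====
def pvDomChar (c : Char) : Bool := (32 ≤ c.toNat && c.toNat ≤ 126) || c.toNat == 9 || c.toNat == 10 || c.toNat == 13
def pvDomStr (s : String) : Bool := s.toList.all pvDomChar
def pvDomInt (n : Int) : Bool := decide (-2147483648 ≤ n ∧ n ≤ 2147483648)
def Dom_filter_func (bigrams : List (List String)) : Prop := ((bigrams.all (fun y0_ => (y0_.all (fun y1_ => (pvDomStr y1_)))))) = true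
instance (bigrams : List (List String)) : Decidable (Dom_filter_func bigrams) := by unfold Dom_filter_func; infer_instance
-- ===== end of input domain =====

-- B replaces A's 34 enumerated `in bg` disjunctions by one data-driven any() pass over a
-- module-level frozenset of target bigrams (objective: idiomatic; same cost).

-- ===== PORT A =====
-- tuple(b) on a list of strings is, for equality/membership purposes, the list itself.
def filter_func (bigrams : List (List String)) : Bool :=
  let bg : PySem.Set (List String) := PySem.Set.ofList bigrams
  (bg.contains ["complimentary", "copy"]) ||
  (bg.contains ["discount", "exchange"]) ||
  (bg.contains ["exchange", "product"]) ||
  (bg.contains ["exchange", "review"]) ||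
  (bg.contains ["exchange", "unbiased"]) ||
  (bg.contains ["exchange", "free"]) ||
  (bg.contains ["exchange", "honest"]) ||
  (bg.contains ["exchange", "true"]) ||
  (bg.contains ["exchange", "truth"]) ||
  (bg.contains ["fair", "review"]) ||
  (bg.contains ["free", "discount"]) ||
  (bg.contains ["free", "exchange"]) ||
  (bg.contains ["free", "sample"]) ||
  (bg.contains ["free", "unbiased"]) ||
  (bg.contains ["honest", "feedback"]) ||
  (bg.contains ["honest", "unbiased"]) ||
  (bg.contains ["opinion", "state"]) ||
  (bg.contains ["opinion", "own"]) ||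
  (bg.contains ["provide", "exchange"]) ||
  (bg.contains ["provide", "sample"]) ||
  (bg.contains ["provided", "sample"]) ||
  (bg.contains ["provided", "exchange"]) ||
  (bg.contains ["receive", "free"]) ||
  (bg.contains ["receive", "free"]) ||
  (bg.contains ["received", "free"]) ||
  (bg.contains ["received", "sample"]) ||
  (bg.contains ["return", "unbiased"]) ||
  (bg.contains ["review", "sample"]) ||
  (bg.contains ["sample", "product"]) ||
  (bg.contains ["sample", "unbiased"]) ||
  (bg.contains ["sample", "free"]) ||
  (bg.contains ["send", "sample"]) ||
  (bg.contains ["unbiased", "review"]) ||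
  (bg.contains ["unbiased", "opinion"]) ||
  (bg.contains ["unbiased", "view"])

-- ===== PORT B =====
-- module-level frozenset TARGETS (distinct literals, first-insertion order)
def targetsList : List (List String) :=
  [["complimentary", "copy"], ["discount", "exchange"], ["exchange", "product"],
   ["exchange", "review"], ["exchange", "unbiased"], ["exchange", "free"],
   ["exchange", "honest"], ["exchange", "true"], ["exchange", "truth"],
   ["fair", "review"], ["free", "discount"], ["free", "exchange"],
   ["free", "sample"], ["free", "unbiased"], ["honest", "feedback"],
   ["honest", "unbiased"], ["opinion", "state"], ["opinion", "own"],
   ["provide", "exchange"], ["provide", "sample"], ["provided", "sample"],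
   ["provided", "exchange"], ["receive", "free"], ["received", "free"],
   ["received", "sample"], ["return", "unbiased"], ["review", "sample"],
   ["sample", "product"], ["sample", "unbiased"], ["sample", "free"],
   ["send", "sample"], ["unbiased", "review"], ["unbiased", "opinion"],
   ["unbiased", "view"]]

def TARGETS : PySem.Set (List String) := PySem.Set.ofList targetsList

def filter_func_alt (bigrams : List (List String)) : Bool :=
  bigrams.any (fun b => TARGETS.contains b)

-- ===== PRECONDITION & SPEC =====
def Spec_filter_func (bigrams : List (List String)) (out : Bool) : Prop := out = filter_func_alt bigrams
instance (bigrams : List (List String)) (out : Bool) : Decidable (Spec_filter_func bigrams out) := by unfold Spec_filter_func; infer_instance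

-- ===== CLAIM (what is proved, stated in full; the proofs are below) =====
def Claim_equal_filter_func : Prop := ∀ (bigrams : List (List String)), Dom_filter_func bigrams → Spec_filter_func bigrams (filter_func bigrams)

-- ===== LEMMAS AND PROOFS =====

theorem contains_TARGETS (b : List String) :
    PySem.Set.contains TARGETS b = targetsList.contains b := by
  rw [Bool.eq_iff_iff]
  simp [TARGETS, PySem.Set.mem_ofList]

theorem any_contains_swap (ts xs : List (List String)) :
    xs.any (fun b => ts.contains b) = ts.any (fun t => xs.contains t) := by
  rw [Bool.eq_iff_iff]
  simp only [List.any_eq_true, List.contains_iff_mem]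
  exact ⟨fun ⟨b, h1, h2⟩ => ⟨b, h2, h1⟩, fun ⟨b, h1, h2⟩ => ⟨b, h2, h1⟩⟩

theorem contains_ofList (xs : List (List String)) (x : List String) :
    PySem.Set.contains (PySem.Set.ofList xs) x = xs.contains x := by
  rw [Bool.eq_iff_iff]
  simp [PySem.Set.mem_ofList]

theorem filter_func_eq_any (bigrams : List (List String)) :
    filter_func bigrams = targetsList.any (fun t => bigrams.contains t) := by
  simp only [filter_func, targetsList, List.any_cons, List.any_nil, Bool.or_false,
    contains_ofList, Bool.or_assoc, Bool.or_self_left]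

-- ===== VERDICT (by name: the statement is the Claim_ definition above) =====
theorem filter_func_spec : Claim_equal_filter_func := by
  intro bigrams _
  unfold Spec_filter_func filter_func_alt
  simp only [contains_TARGETS]
  rw [any_contains_swap, filter_func_eq_any]
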